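-- pv_equiv track=rewrite | github.com/CasVisser/aoc-2023 | day13.py | reflection_score
-- ===== SOURCE A (Python) =====
-- def reflection_score(lines):
--     for i in range(len(lines) - 1):
--         for d in range(min(i + 1, len(lines) - i - 1)):
--             if lines[i - d] != lines[i + 1 + d]:
--                 break
--         else:
--             return i + 1
--     return -1
-- ===== SOURCE B (Python) =====
-- def reflection_score(lines):
--     # A boundary-complete mirror at split p is exactly an even palindrome
--     # anchored at an edge: test each edge-anchored window against its reverse,
--     # after the cheap necessary check that the innermost pair matches.
--     n = len(lines)
--     for p in range(1, n):
--         if lines[p - 1] != lines[p]: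
--             continue
--         w = lines[:2 * p] if 2 * p <= n else lines[2 * p - n:]
--         if w == w[::-1]:
--             return p
--     return -1
-- ===== Notes on version B (the rewrite author's own statement) =====
-- stated objective: alternative
-- what changed: B reformulates a boundary-complete mirror as an edge-anchored even palindrome: after a cheap innermost-pair check it tests the whole window lines[:2p] (or lines[2p-n:]) against its reverse, instead of A's center-expansion double loop over pair indices.
import Mathlib
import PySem

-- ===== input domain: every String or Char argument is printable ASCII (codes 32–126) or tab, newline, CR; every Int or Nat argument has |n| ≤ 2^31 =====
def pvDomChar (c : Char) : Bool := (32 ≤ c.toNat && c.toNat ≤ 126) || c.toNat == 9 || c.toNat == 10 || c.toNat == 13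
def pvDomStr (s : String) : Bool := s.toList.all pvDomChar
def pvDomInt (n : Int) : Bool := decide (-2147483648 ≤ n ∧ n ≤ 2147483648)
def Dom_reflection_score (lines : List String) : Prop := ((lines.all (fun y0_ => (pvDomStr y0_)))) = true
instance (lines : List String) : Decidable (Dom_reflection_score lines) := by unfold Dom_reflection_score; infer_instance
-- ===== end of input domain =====

-- B reformulates a boundary-complete mirror as an edge-anchored even palindrome and tests
-- each window lines[:2p] / lines[2p-n:] against its reverse, instead of A's center-expansion double loop.


-- ===== PORT A =====
-- inner 'for d in range(min(i+1, len(lines)-i-1)): if lines[i-d] != lines[i+1+d]: break / else:'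
def aCheck (lines : List String) (i : Int) : Bool :=
  (PySem.List.pyRange 0 (min (i + 1) ((lines.length : Int) - i - 1)) 1).all
    (fun d => PySem.List.pyGet? lines (i - d) == PySem.List.pyGet? lines (i + 1 + d))

-- outer 'for i in range(len(lines)-1): … return i+1 / return -1'
def aLoop (lines : List String) : List Int → Int
  | [] => -1
  | i :: is => if aCheck lines i then i + 1 else aLoop lines is

def reflection_score (lines : List String) : Int :=
  aLoop lines (PySem.List.pyRange 0 ((lines.length : Int) - 1) 1)

-- ===== PORT B =====
-- 'if lines[p-1] != lines[p]: continue; w = lines[:2*p] if 2*p <= n else lines[2*p-n:]; if w == w[::-1]: return p'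
-- (w[::-1] is ported as w.reverse, exact by PySem.List.slice?_none_none_neg_one)
def bLoop (lines : List String) : List Int → Int
  | [] => -1
  | p :: ps =>
    if !(PySem.List.pyGet? lines (p - 1) == PySem.List.pyGet? lines p) then bLoop lines ps
    else
      let w := if 2 * p ≤ (lines.length : Int)
               then PySem.List.slice lines none (some (2 * p))
               else PySem.List.slice lines (some (2 * p - (lines.length : Int))) none
      if w == w.reverse then p else bLoop lines ps

def reflection_score_alt (lines : List String) : Int :=
  bLoop lines (PySem.List.pyRange 1 (lines.length : Int) 1)

-- ===== PRECONDITION & SPEC =====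
def Spec_reflection_score (lines : List String) (out : Int) : Prop := out = reflection_score_alt lines
instance (lines : List String) (out : Int) : Decidable (Spec_reflection_score lines out) := by unfold Spec_reflection_score; infer_instance

-- ===== CLAIM (what is proved, stated in full; the proofs are below) =====
def Claim_equal_reflection_score : Prop := ∀ (lines : List String), Dom_reflection_score lines → Spec_reflection_score lines (reflection_score lines)

-- ===== LEMMAS AND PROOFS =====

-- A's inner for-else as a Prop over natural pair indices.
theorem aCheck_iff (lines : List String) (i : Nat) (hi : i < lines.length) :
    aCheck lines (i : Int) = true ↔
      ∀ d < min (i + 1) (lines.length - i - 1), lines[i - d]! = lines[i + 1 + d]! := by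
  have hmin : min ((i : Int) + 1) ((lines.length : Int) - (i : Int) - 1)
      = ((min (i + 1) (lines.length - i - 1) : Nat) : Int) := by push_cast; omega
  rw [aCheck, hmin, PySem.List.pyRange_one]
  have h0 : ((min (i + 1) (lines.length - i - 1) : Nat) : Int) - 0
      = (min (i + 1) (lines.length - i - 1) : Nat) := by omega
  rw [h0, Int.toNat_natCast, List.all_map, List.all_eq_true]
  constructor
  · intro h d hd
    have := h d (List.mem_range.mpr hd)
    have hA : i - d < lines.length := by omega
    have hB : i + 1 + d < lines.length := by omega
    have e2 : (0 : Int) + (d : Int) = (d : Int) := by omega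
    simp only [Function.comp_apply, e2] at this
    have e3 : (i : Int) - (d : Int) = ((i - d : Nat) : Int) := by omega
    have e4 : (i : Int) + 1 + (d : Int) = ((i + 1 + d : Nat) : Int) := by push_cast; omega
    rw [e3, e4, PySem.List.pyGet?_natCast, PySem.List.pyGet?_natCast,
      List.getElem?_eq_getElem hA, List.getElem?_eq_getElem hB] at this
    rw [getElem!_pos lines (i - d) hA, getElem!_pos lines (i + 1 + d) hB]
    simpa using this
  · intro h d hd
    have hd' : d < min (i + 1) (lines.length - i - 1) := List.mem_range.mp hd
    have hA : i - d < lines.length := by omega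
    have hB : i + 1 + d < lines.length := by omega
    have e2 : (0 : Int) + (d : Int) = (d : Int) := by omega
    simp only [Function.comp_apply, e2]
    have e3 : (i : Int) - (d : Int) = ((i - d : Nat) : Int) := by omega
    have e4 : (i : Int) + 1 + (d : Int) = ((i + 1 + d : Nat) : Int) := by push_cast; omega
    rw [e3, e4, PySem.List.pyGet?_natCast, PySem.List.pyGet?_natCast,
      List.getElem?_eq_getElem hA, List.getElem?_eq_getElem hB]
    have := h d hd'
    rw [getElem!_pos lines (i - d) hA, getElem!_pos lines (i + 1 + d) hB] at this
    simpa using this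

-- getElem! bridges for take/drop (specific index bookkeeping for the two windows).
theorem take_bang (l : List String) (m j : Nat) (hj : j < (l.take m).length) :
    (l.take m)[j]! = l[j]! := by
  have hj' : j < l.length := by simp at hj; omega
  rw [getElem!_pos (l.take m) j hj, List.getElem_take, getElem!_pos l j hj']

theorem drop_bang (l : List String) (m j : Nat) (hj : j < (l.drop m).length) :
    (l.drop m)[j]! = l[m + j]! := by
  have hj' : m + j < l.length := by simp at hj; omega
  rw [getElem!_pos (l.drop m) j hj, List.getElem_drop, getElem!_pos l (m + j) hj']

-- A list equals its reverse iff the symmetric index pairs agree.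
theorem beq_reverse_iff (l : List String) :
    ((l == l.reverse) = true) ↔ ∀ j, j < l.length → l[j]! = l[l.length - 1 - j]! := by
  rw [beq_iff_eq]
  constructor
  · intro h j hj
    rw [getElem!_pos l j hj, getElem!_pos l _ (show l.length - 1 - j < l.length by omega),
      List.getElem_of_eq h hj, List.getElem_reverse]
  · intro h
    apply List.ext_getElem (by simp)
    intro j h1 h2
    rw [List.getElem_reverse]
    have := h j h1
    rw [getElem!_pos l j h1, getElem!_pos l _ (show l.length - 1 - j < l.length by omega)] at this
    exact this

-- B's window test equals A's pairwise condition, at split p = i + 1.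
theorem window_eq (lines : List String) (i : Nat) (hi : i + 1 < lines.length) :
    ((if 2 * ((i : Int) + 1) ≤ (lines.length : Int)
        then PySem.List.slice lines none (some (2 * ((i : Int) + 1)))
        else PySem.List.slice lines (some (2 * ((i : Int) + 1) - (lines.length : Int))) none)
      == (if 2 * ((i : Int) + 1) ≤ (lines.length : Int)
        then PySem.List.slice lines none (some (2 * ((i : Int) + 1)))
        else PySem.List.slice lines (some (2 * ((i : Int) + 1) - (lines.length : Int))) none).reverse)
    = aCheck lines (i : Int) := by
  set n := lines.length with hn
  have hi' : i < n := by omega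
  rw [Bool.eq_iff_iff, aCheck_iff lines i hi']
  by_cases hc : 2 * ((i : Int) + 1) ≤ (n : Int)
  · have hc' : 2 * (i + 1) ≤ n := by omega
    have e1 : 2 * ((i : Int) + 1) = ((2 * (i + 1) : Nat) : Int) := by omega
    rw [if_pos hc, e1, PySem.List.slice_to_natCast, beq_reverse_iff]
    have hlen : (lines.take (2 * (i + 1))).length = 2 * (i + 1) := by simp; omega
    have hmin : min (i + 1) (n - i - 1) = i + 1 := by omega
    rw [hmin]
    constructor
    · intro h d hd
      have := h (i - d) (by omega)
      rw [take_bang lines (2 * (i + 1)) (i - d) (by omega),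
        take_bang lines (2 * (i + 1)) _ (by omega),
        show (lines.take (2 * (i + 1))).length - 1 - (i - d) = i + 1 + d by omega] at this
      exact this
    · intro h j hj
      rw [take_bang lines (2 * (i + 1)) j hj, take_bang lines (2 * (i + 1)) _ (by omega),
        show (lines.take (2 * (i + 1))).length - 1 - j = 2 * (i + 1) - 1 - j by omega]
      have hj' : j < 2 * (i + 1) := by omega
      by_cases hjp : j ≤ i
      · have := h (i - j) (by omega)
        rw [show i - (i - j) = j by omega, show i + 1 + (i - j) = 2 * (i + 1) - 1 - j by omega] at this
        exact this
      · have := h (j - (i + 1)) (by omega)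
        rw [show i + 1 + (j - (i + 1)) = j by omega,
          show i - (j - (i + 1)) = 2 * (i + 1) - 1 - j by omega] at this
        exact this.symm
  · have hc' : n < 2 * (i + 1) := by omega
    have e1 : 2 * ((i : Int) + 1) - (n : Int) = ((2 * (i + 1) - n : Nat) : Int) := by omega
    rw [if_neg hc, e1, PySem.List.slice_from_natCast, beq_reverse_iff]
    set a := 2 * (i + 1) - n with ha
    have hlen : (lines.drop a).length = 2 * (n - i - 1) := by simp [hn]; omega
    have hmin : min (i + 1) (n - i - 1) = n - i - 1 := by omega
    rw [hmin]
    constructor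
    · intro h d hd
      have := h (n - i - 2 - d) (by omega)
      rw [drop_bang lines a (n - i - 2 - d) (by omega), drop_bang lines a _ (by omega),
        show a + (n - i - 2 - d) = i - d by omega,
        show a + ((lines.drop a).length - 1 - (n - i - 2 - d)) = i + 1 + d by omega] at this
      exact this
    · intro h j hj
      rw [drop_bang lines a j hj, drop_bang lines a _ (by omega)]
      by_cases hjp : j ≤ n - i - 2
      · have := h (n - i - 2 - j) (by omega)
        rw [show i - (n - i - 2 - j) = a + j by omega,
          show i + 1 + (n - i - 2 - j) = a + ((lines.drop a).length - 1 - j) by omega] at this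
        exact this
      · have := h (j - (n - i - 1)) (by omega)
        rw [show i + 1 + (j - (n - i - 1)) = a + j by omega,
          show i - (j - (n - i - 1)) = a + ((lines.drop a).length - 1 - j) by omega] at this
        exact this.symm

-- If the innermost pair differs, A's inner for-else fails (at d = 0).
theorem pair_false (lines : List String) (i : Nat) (hi : i + 1 < lines.length)
    (hg : (PySem.List.pyGet? lines ((i : Int) + 1 - 1) == PySem.List.pyGet? lines ((i : Int) + 1)) = false) :
    aCheck lines (i : Int) = false := by
  rw [show ((i : Int) + 1 - 1) = ((i : Nat) : Int) by omega,
    show ((i : Int) + 1) = (((i + 1 : Nat) : Nat) : Int) by omega,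
    PySem.List.pyGet?_natCast, PySem.List.pyGet?_natCast,
    List.getElem?_eq_getElem (by omega : i < lines.length),
    List.getElem?_eq_getElem hi] at hg
  have hne : lines[i] ≠ lines[i + 1] := by simpa using hg
  by_contra h
  have h' : aCheck lines (i : Int) = true := by
    cases hac : aCheck lines (i : Int) with
    | false => exact absurd hac h
    | true => rfl
  have := (aCheck_iff lines i (by omega)).mp h' 0 (by omega)
  rw [Nat.sub_zero, Nat.add_zero, getElem!_pos lines i (by omega),
    getElem!_pos lines (i + 1) hi] at this
  exact hne this

-- Main loop correspondence: B's loop from split i+1 equals A's remaining outer loop from i.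
theorem loop_eq (lines : List String) (k : Nat) :
    ∀ i : Nat, i + k = lines.length →
      bLoop lines (PySem.List.pyRange ((i : Int) + 1) (lines.length : Int) 1) =
        aLoop lines (PySem.List.pyRange (i : Int) ((lines.length : Int) - 1) 1) := by
  induction k with
  | zero =>
    intro i h
    rw [PySem.List.pyRange_one_eq_nil (by omega), PySem.List.pyRange_one_eq_nil (by omega)]
    rfl
  | succ k ih =>
    intro i h
    by_cases hlast : i + 1 = lines.length
    · rw [PySem.List.pyRange_one_eq_nil (by omega), PySem.List.pyRange_one_eq_nil (by omega)]
      rfl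
    · have hi : i + 1 < lines.length := by omega
      have hb := PySem.List.pyRange_one_cons (a := (i : Int) + 1) (b := (lines.length : Int)) (by omega)
      have ha := PySem.List.pyRange_one_cons (a := (i : Int)) (b := (lines.length : Int) - 1) (by omega)
      rw [hb, ha]
      simp only [bLoop, aLoop]
      have e : ((i : Int) + 1) + 1 = (((i + 1 : Nat) : Int)) + 1 := by push_cast; ring
      by_cases hg : (PySem.List.pyGet? lines ((i : Int) + 1 - 1) == PySem.List.pyGet? lines ((i : Int) + 1)) = true
      · rw [hg]
        simp only [Bool.not_true, Bool.false_eq_true, if_false]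
        rw [window_eq lines i hi]
        by_cases hc : aCheck lines (i : Int) = true
        · rw [if_pos hc, if_pos hc]
        · rw [if_neg hc, if_neg hc, e, ih (i + 1) (by omega)]
          norm_cast
      · have hg' := Bool.eq_false_iff.mpr (fun h => hg h)
        rw [hg']
        simp only [Bool.not_false, if_true]
        rw [if_neg (by rw [pair_false lines i hi hg']; exact Bool.false_ne_true), e, ih (i + 1) (by omega)]
        norm_cast

-- ===== VERDICT (by name: the statement is the Claim_ definition above) =====
theorem reflection_score_spec : Claim_equal_reflection_score := by
  intro lines _
  unfold Spec_reflection_score reflection_score reflection_score_alt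
  have := loop_eq lines lines.length 0 (by omega)
  simpa using this.symm
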